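-- pv_equiv track=rewrite | github.com/bjks/gfp_gaussian_process | notebooks/read_ggp_run.py | get_param_code
-- ===== SOURCE A (Python) =====
-- def get_param_code(paramter_settings):
--     param_code = '_f'
--     for i,k in enumerate(paramter_settings.keys()):
--         if paramter_settings[k]=='free':
--             param_code+=str(i)
--
--     param_code += "_b"
--     for i,k in enumerate(paramter_settings.keys()):
--         if paramter_settings[k]=='bound':
--             param_code+=str(i)
--     return param_code
-- ===== SOURCE B (Python) =====
-- def get_param_code(paramter_settings):
--     groups = {}
--     for i, v in enumerate(paramter_settings.values()):
--         groups[v] = groups.get(v, '') + str(i)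
--     return '_f' + groups.get('free', '') + '_b' + groups.get('bound', '')
-- ===== Notes on version B (the rewrite author's own statement) =====
-- stated objective: simpler
-- what changed: Replaces A's two filtered passes over the keys (each re-looking up the dict by key) by one pass over the values that maintains a grouping dict mapping each setting value to the concatenation of its index strings, emitted once at the end in the fixed free/bound shape.
import Mathlib
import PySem

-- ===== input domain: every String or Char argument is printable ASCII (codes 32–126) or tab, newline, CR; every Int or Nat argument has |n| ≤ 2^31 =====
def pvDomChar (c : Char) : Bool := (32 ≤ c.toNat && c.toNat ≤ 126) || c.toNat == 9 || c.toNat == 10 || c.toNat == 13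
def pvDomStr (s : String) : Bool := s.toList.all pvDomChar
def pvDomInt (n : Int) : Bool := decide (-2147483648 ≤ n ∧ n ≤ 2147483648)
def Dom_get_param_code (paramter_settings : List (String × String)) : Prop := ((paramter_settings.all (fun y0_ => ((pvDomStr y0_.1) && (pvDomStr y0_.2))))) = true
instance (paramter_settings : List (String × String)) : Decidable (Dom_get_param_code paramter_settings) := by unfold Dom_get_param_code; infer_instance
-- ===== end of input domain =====

-- B replaces A's two filtered passes over the keys by a single pass over the values that
-- maintains a grouping dict value -> concatenated indices, emitted once at the end (objective: simpler).


-- ===== PORT A =====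
-- paramter_settings is a Python dict: PySem.Dict.ofList gives its insertion order / last-wins
-- semantics. 'paramter_settings[k]' is ported as getD with default "" — exact, since k ranges
-- over the dict's own keys, so the KeyError branch is unreachable.
def get_param_code (paramter_settings : List (String × String)) : String :=
  let d := PySem.Dict.ofList paramter_settings
  let param_code := "_f"
  let param_code := (PySem.List.enumerate d.keys).foldl
    (fun param_code ik => if d.getD ik.2 "" == "free" then param_code ++ PySem.Int.toStr ik.1 else param_code)
    param_code
  let param_code := param_code ++ "_b"
  let param_code := (PySem.List.enumerate d.keys).foldl
    (fun param_code ik => if d.getD ik.2 "" == "bound" then param_code ++ PySem.Int.toStr ik.1 else param_code)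
    param_code
  param_code

-- ===== PORT B =====
def get_param_code_alt (paramter_settings : List (String × String)) : String :=
  let d := PySem.Dict.ofList paramter_settings
  let groups := (PySem.List.enumerate d.values).foldl
    (fun groups iv => groups.insert iv.2 (groups.getD iv.2 "" ++ PySem.Int.toStr iv.1))
    PySem.Dict.empty
  "_f" ++ groups.getD "free" "" ++ "_b" ++ groups.getD "bound" ""

-- ===== PRECONDITION & SPEC =====
def Spec_get_param_code (paramter_settings : List (String × String)) (out : String) : Prop := out = get_param_code_alt paramter_settings
instance (paramter_settings : List (String × String)) (out : String) : Decidable (Spec_get_param_code paramter_settings out) := by unfold Spec_get_param_code; infer_instance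

-- ===== CLAIM (what is proved, stated in full; the proofs are below) =====
def Claim_equal_get_param_code : Prop := ∀ (paramter_settings : List (String × String)), Dom_get_param_code paramter_settings → Spec_get_param_code paramter_settings (get_param_code paramter_settings)

-- ===== LEMMAS AND PROOFS =====

-- concatenation of a list of strings (proof-side canonical form of both loops)
def pvStrcat (xs : List String) : String := xs.foldr (· ++ ·) ""

theorem pvStrcat_cons (x : String) (xs : List String) : pvStrcat (x :: xs) = x ++ pvStrcat xs := rfl

-- A's pass for a fixed target t equals acc ++ concatenation of str(i) over the matching pairs
theorem pvAfold (p : Int × String → Bool) (l : List (Int × String)) (acc : String) :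
    l.foldl (fun acc ik => if p ik then acc ++ PySem.Int.toStr ik.1 else acc) acc
      = acc ++ pvStrcat ((l.filter p).map (fun ik => PySem.Int.toStr ik.1)) := by
  induction l generalizing acc with
  | nil => simp [pvStrcat]
  | cons x xs ih =>
    by_cases h : p x
    · simp [List.foldl_cons, h, ih, pvStrcat_cons, String.append_assoc]
    · simp [List.foldl_cons, h, ih]

-- B's grouping loop: the entry at key c collects str(i) for exactly the pairs whose value is c
theorem pvGroups (l : List (Int × String)) (g : PySem.Dict String String) (c : String) :
    (l.foldl (fun g iv => g.insert iv.2 (g.getD iv.2 "" ++ PySem.Int.toStr iv.1)) g).getD c ""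
      = g.getD c "" ++ pvStrcat ((l.filter (fun iv => iv.2 == c)).map (fun iv => PySem.Int.toStr iv.1)) := by
  induction l generalizing g with
  | nil => simp [pvStrcat]
  | cons x xs ih =>
    simp only [List.foldl_cons, List.filter_cons, ih]
    by_cases h : x.2 = c
    · simp [h, pvStrcat_cons, String.append_assoc]
    · simp [h, PySem.Dict.getD_insert, Ne.symm h]

theorem pvEnumerate_map {α β : Type} (f : α → β) (l : List α) (s : Int) :
    PySem.List.enumerate (l.map f) s = (PySem.List.enumerate l s).map (fun p => (p.1, f p.2)) := by
  induction l generalizing s with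
  | nil => simp [PySem.List.enumerate_nil]
  | cons x xs ih => simp [PySem.List.enumerate_cons, ih]

-- the two canonical forms coincide: grouping the values equals filtering the keys by lookup
theorem pvGroupEqLookup (d : PySem.Dict String String) (hnd : d.keys.Nodup) (t : String) :
    ((PySem.List.enumerate d.values).filter (fun iv => iv.2 == t)).map (fun iv => PySem.Int.toStr iv.1)
      = ((PySem.List.enumerate d.keys).filter (fun ik => d.getD ik.2 "" == t)).map (fun ik => PySem.Int.toStr ik.1) := by
  rw [PySem.Dict.values_eq_map_keys d hnd "",
      pvEnumerate_map, List.filter_map, List.map_map]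
  rfl

theorem pvMain (ps : List (String × String)) : get_param_code ps = get_param_code_alt ps := by
  unfold get_param_code get_param_code_alt
  simp only [pvAfold, pvGroups, PySem.Dict.getD_empty,
    pvGroupEqLookup (PySem.Dict.ofList ps) (PySem.Dict.nodup_keys_ofList ps),
    String.append_assoc]
  simp

-- ===== VERDICT (by name: the statement is the Claim_ definition above) =====
theorem get_param_code_spec : Claim_equal_get_param_code := by
  intro ps _
  exact pvMain ps
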